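-- pv_equiv track=rewrite | github.com/StephenArg/Overlap_Graphs | main_program.py | k_edges
-- ===== SOURCE A (Python) =====
-- import itertools
--
-- def is_k_overlap(s1, s2, k):
--     return s1[-k:] == s2[:k]
--
-- def k_edges(data, k):
--     edges = []
--     for u,v in itertools.combinations(data, 2):
--         u_dna, v_dna = data[u], data[v]
--
--         if is_k_overlap(u_dna, v_dna, k):
--             edges.append((u,v))
--
--         if is_k_overlap(v_dna, u_dna, k):
--             edges.append((v,u))
--     return edges
-- ===== SOURCE B (Python) =====
-- def k_edges(data, k):
--     keys = list(data)
--     n = len(keys)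
--     idx = {u: i for i, u in enumerate(keys)}
--     pref = {}
--     for u in keys:
--         pref.setdefault(data[u][:k], []).append(u)
--     edges = []
--     for u in keys:
--         for v in pref.get(data[u][-k:], []):
--             if v != u:
--                 edges.append((u, v))
--     edges.sort(key=lambda e: (min(idx[e[0]], idx[e[1]]) * n + max(idx[e[0]], idx[e[1]])) * 2
--                              + (1 if idx[e[0]] > idx[e[1]] else 0))
--     return edges
-- ===== Notes on version B (the rewrite author's own statement) =====
-- stated objective: faster
-- what changed: B replaces A's all-pairs scan (every pair of keys, comparing k-slices) by a dict index from each node's k-prefix to its nodes, one suffix lookup per node, and a final stable sort of the found edges by their combination position, restoring A's exact output order.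
import Mathlib
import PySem

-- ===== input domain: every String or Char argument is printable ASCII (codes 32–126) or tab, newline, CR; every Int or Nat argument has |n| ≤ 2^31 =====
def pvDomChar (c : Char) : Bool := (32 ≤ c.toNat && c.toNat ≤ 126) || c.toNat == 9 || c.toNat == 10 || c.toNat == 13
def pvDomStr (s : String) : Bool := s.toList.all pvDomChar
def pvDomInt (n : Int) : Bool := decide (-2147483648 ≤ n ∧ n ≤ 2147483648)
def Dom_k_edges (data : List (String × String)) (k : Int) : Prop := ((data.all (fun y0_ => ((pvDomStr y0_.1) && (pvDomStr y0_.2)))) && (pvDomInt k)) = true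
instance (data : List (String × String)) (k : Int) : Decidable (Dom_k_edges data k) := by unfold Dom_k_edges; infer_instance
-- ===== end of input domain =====

-- B replaces A's quadratic all-pairs scan by a hash index from k-prefix to nodes plus a
-- sort of the found edges by combination position (objective: faster).

-- ===== PORT A =====
-- s1[-k:] == s2[:k]
def is_k_overlap (s1 s2 : String) (k : Int) : Bool :=
  PySem.List.slice s1.toList (some (-k)) none == PySem.List.slice s2.toList none (some k)

-- itertools.combinations(l, 2), in Python's order
def comb2 {α : Type} : List α → List (α × α)
  | [] => []
  | x :: xs => xs.map (fun y => (x, y)) ++ comb2 xs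

-- iterating the Python dict = iterating the keys of PySem.Dict.ofList data;
-- data[u] never raises here (u is a key), so it is d.getD u ""
def k_edges (data : List (String × String)) (k : Int) : List (String × String) :=
  let d := PySem.Dict.ofList data
  (comb2 d.keys).foldl
    (fun edges p =>
      let u_dna := d.getD p.1 ""
      let v_dna := d.getD p.2 ""
      let edges := if is_k_overlap u_dna v_dna k then edges ++ [(p.1, p.2)] else edges
      if is_k_overlap v_dna u_dna k then edges ++ [(p.2, p.1)] else edges)
    []

-- ===== PORT B =====
-- the sort key of Source B; idx[e[0]] never raises (edge ends are keys), so it is idx.getD e.1 0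
def bKey (idx : PySem.Dict String Int) (n : Int) (e : String × String) : Int :=
  (min (idx.getD e.1 0) (idx.getD e.2 0) * n + max (idx.getD e.1 0) (idx.getD e.2 0)) * 2
    + (if idx.getD e.1 0 > idx.getD e.2 0 then 1 else 0)

def k_edges_alt (data : List (String × String)) (k : Int) : List (String × String) :=
  let d := PySem.Dict.ofList data
  let keys := d.keys
  let n : Int := keys.length
  let idx : PySem.Dict String Int :=
    (PySem.List.enumerate keys 0).foldl (fun m p => m.insert p.2 p.1) PySem.Dict.empty
  let pref : PySem.Dict (List Char) (List String) :=
    keys.foldl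
      (fun m u => m.modify (PySem.List.slice (d.getD u "").toList none (some k)) [] (· ++ [u]))
      PySem.Dict.empty
  let edges :=
    keys.foldl (fun es u =>
      (pref.getD (PySem.List.slice (d.getD u "").toList (some (-k)) none) []).foldl
        (fun es v => if v ≠ u then es ++ [(u, v)] else es) es) []
  PySem.List.sorted edges (bKey idx n) false

-- ===== PRECONDITION & SPEC =====
def Spec_k_edges (data : List (String × String)) (k : Int) (out : List (String × String)) : Prop := out = k_edges_alt data k
instance (data : List (String × String)) (k : Int) (out : List (String × String)) : Decidable (Spec_k_edges data k out) := by unfold Spec_k_edges; infer_instance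

-- ===== CLAIM (what is proved, stated in full; the proofs are below) =====
def Claim_equal_k_edges : Prop := ∀ (data : List (String × String)) (k : Int), Dom_k_edges data k → Spec_k_edges data k (k_edges data k)

-- ===== LEMMAS AND PROOFS =====

-- A's per-pair contribution: (u,v) if suf(u)=pre(v), then (v,u) if suf(v)=pre(u)
def pvChunkA (suf pre : String → List Char) (p : String × String) : List (String × String) :=
  (if suf p.1 == pre p.2 then [(p.1, p.2)] else []) ++
  (if suf p.2 == pre p.1 then [(p.2, p.1)] else [])

-- the index dict of B
def pvIdxD (keys : List String) : PySem.Dict String Int :=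
  (PySem.List.enumerate keys 0).foldl (fun m p => m.insert p.2 p.1) PySem.Dict.empty

-- the edge list of B before sorting
def pvEdgesB (keys : List String) (suf pre : String → List Char) : List (String × String) :=
  keys.flatMap (fun u =>
    ((keys.filter (fun v => pre v == suf u)).filter (fun v => decide (v ≠ u))).map
      (fun v => (u, v)))

lemma comb2_mem_parts {α : Type} {l : List α} {p : α × α} (h : p ∈ comb2 l) :
    p.1 ∈ l ∧ p.2 ∈ l := by
  induction l with
  | nil => simp [comb2] at h
  | cons x xs ih =>
    simp only [comb2, List.mem_append, List.mem_map] at h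
    rcases h with ⟨y, hy, hp⟩ | h
    · subst hp; exact ⟨List.mem_cons_self, List.mem_cons_of_mem _ hy⟩
    · exact ⟨List.mem_cons_of_mem _ (ih h).1, List.mem_cons_of_mem _ (ih h).2⟩

lemma mem_comb2_getD {α : Type} (l : List α) (d : α) {i j : Nat}
    (hij : i < j) (hj : j < l.length) : (l.getD i d, l.getD j d) ∈ comb2 l := by
  induction l generalizing i j with
  | nil => simp at hj
  | cons x xs ih =>
    cases i with
    | zero =>
      obtain ⟨j', rfl⟩ : ∃ j', j = j' + 1 := ⟨j - 1, by omega⟩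
      simp only [comb2, List.mem_append, List.mem_map, List.getD_cons_zero, List.getD_cons_succ]
      exact Or.inl ⟨xs.getD j' d, by
        rw [List.getD_eq_getElem _ _ (by simpa using hj)]; exact List.getElem_mem _, rfl⟩
    | succ i' =>
      obtain ⟨j', rfl⟩ : ∃ j', j = j' + 1 := ⟨j - 1, by omega⟩
      simp only [comb2, List.mem_append, List.getD_cons_succ]
      exact Or.inr (ih (by omega) (by simpa using hj))

lemma comb2_elim {α : Type} {l : List α} {p : α × α} (d : α) (h : p ∈ comb2 l) :
    ∃ i j : Nat, i < j ∧ j < l.length ∧ p.1 = l.getD i d ∧ p.2 = l.getD j d := by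
  induction l with
  | nil => simp [comb2] at h
  | cons x xs ih =>
    simp only [comb2, List.mem_append, List.mem_map] at h
    rcases h with ⟨y, hy, hp⟩ | h
    · obtain ⟨m, hm, hym⟩ := List.getElem_of_mem hy
      refine ⟨0, m + 1, by omega, by simpa using hm, ?_, ?_⟩
      · rw [← hp]; simp
      · rw [← hp]
        simp only [List.getD_cons_succ]
        rw [List.getD_eq_getElem _ _ hm, hym]
    · obtain ⟨i, j, hij, hj, h1, h2⟩ := ih h
      exact ⟨i + 1, j + 1, by omega, by simpa using hj, by simpa using h1, by simpa using h2⟩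

lemma comb2_pairwise {α : Type} {l : List α} {R : α → α → Prop} (hl : l.Pairwise R) :
    (comb2 l).Pairwise (fun p q => R p.1 q.1 ∨ (p.1 = q.1 ∧ R p.2 q.2)) := by
  induction l with
  | nil => simp [comb2]
  | cons x xs ih =>
    rcases List.pairwise_cons.mp hl with ⟨hx, hxs⟩
    simp only [comb2, List.pairwise_append]
    refine ⟨?_, ih hxs, ?_⟩
    · rw [List.pairwise_map]
      exact hxs.imp (fun h => Or.inr ⟨rfl, h⟩)
    · intro a ha b hb
      rcases List.mem_map.mp ha with ⟨y, _, rfl⟩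
      exact Or.inl (hx _ (comb2_mem_parts hb).1)

lemma idx_fold_notmem {l : List String} {u : String} (hu : u ∉ l) (s : Int)
    (m : PySem.Dict String Int) :
    ((PySem.List.enumerate l s).foldl (fun m p => m.insert p.2 p.1) m).getD u 0 = m.getD u 0 := by
  induction l generalizing s m with
  | nil => simp [PySem.List.enumerate]
  | cons x xs ih =>
    rw [PySem.List.enumerate_cons]
    simp only [List.foldl_cons]
    rw [ih (fun h => hu (List.mem_cons_of_mem _ h))]
    rw [PySem.Dict.getD_insert]
    have : u ≠ x := fun h => hu (h ▸ List.mem_cons_self)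
    simp [this]

lemma idx_fold_mem {l : List String} {u : String} (hnd : l.Nodup) (hu : u ∈ l) (s : Int)
    (m : PySem.Dict String Int) :
    ((PySem.List.enumerate l s).foldl (fun m p => m.insert p.2 p.1) m).getD u 0
      = s + (l.idxOf u : Int) := by
  induction l generalizing s m with
  | nil => simp at hu
  | cons x xs ih =>
    rw [PySem.List.enumerate_cons]
    simp only [List.foldl_cons]
    rcases List.nodup_cons.mp hnd with ⟨hx, hxs⟩
    by_cases hux : u = x
    · subst hux
      rw [idx_fold_notmem hx]
      simp [List.idxOf_cons_self]
    · have hu' : u ∈ xs := (List.mem_cons.mp hu).resolve_left hux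
      rw [ih hxs hu']
      rw [List.idxOf_cons_ne _ (Ne.symm hux)]
      push_cast
      ring

lemma idx_getD {keys : List String} {u : String} (hnd : keys.Nodup) (hu : u ∈ keys) :
    (pvIdxD keys).getD u 0 = (keys.idxOf u : Int) := by
  rw [pvIdxD, idx_fold_mem hnd hu]
  ring

lemma nodup_pairwise_idxOf {keys : List String} (hnd : keys.Nodup) :
    keys.Pairwise (fun u v => keys.idxOf u < keys.idxOf v) := by
  rw [List.pairwise_iff_getElem]
  intro i j hi hj hij
  rw [hnd.idxOf_getElem i hi, hnd.idxOf_getElem j hj]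
  exact hij

lemma enc_lt {i j i' j' n : Nat} (hj : j < n) (hij' : i' < j')
    (hlex : i < i' ∨ (i = i' ∧ j < j')) : (i * n + j) * 2 + 1 < (i' * n + j') * 2 := by
  rcases hlex with h | ⟨rfl, h⟩
  · nlinarith
  · nlinarith

-- bKey value on an edge whose first end comes earlier in keys
lemma bKey_eval_lt {keys : List String} {u v : String} (hnd : keys.Nodup)
    (hu : u ∈ keys) (hv : v ∈ keys) (h : keys.idxOf u < keys.idxOf v) :
    bKey (pvIdxD keys) (keys.length : Int) (u, v)
      = ((keys.idxOf u * keys.length + keys.idxOf v) * 2 : Nat)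
    ∧ bKey (pvIdxD keys) (keys.length : Int) (v, u)
      = ((keys.idxOf u * keys.length + keys.idxOf v) * 2 + 1 : Nat) := by
  have h' : (keys.idxOf u : Int) < (keys.idxOf v : Int) := Nat.cast_lt.mpr h
  constructor
  · simp only [bKey, idx_getD hnd hu, idx_getD hnd hv]
    rw [min_eq_left h'.le, max_eq_right h'.le, if_neg (by omega)]
    push_cast; ring
  · simp only [bKey, idx_getD hnd hu, idx_getD hnd hv]
    rw [min_eq_right h'.le, max_eq_left h'.le, if_pos h']
    push_cast; ring

-- membership characterisation of A's edge list
lemma memA {keys : List String} {suf pre : String → List Char} (hnd : keys.Nodup)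
    {x : String × String} :
    x ∈ (comb2 keys).flatMap (pvChunkA suf pre) ↔
      x.1 ∈ keys ∧ x.2 ∈ keys ∧ x.1 ≠ x.2 ∧ suf x.1 = pre x.2 := by
  constructor
  · intro h
    obtain ⟨p, hp, hx⟩ := List.mem_flatMap.mp h
    obtain ⟨i, j, hij, hj, h1, h2⟩ := comb2_elim "" hp
    have hi : i < keys.length := lt_trans hij hj
    have hne : p.1 ≠ p.2 := by
      rw [h1, h2, List.getD_eq_getElem _ _ hi, List.getD_eq_getElem _ _ hj]
      intro he
      have := hnd.idxOf_getElem i hi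
      rw [he, hnd.idxOf_getElem j hj] at this
      omega
    rcases comb2_mem_parts hp with ⟨hm1, hm2⟩
    simp only [pvChunkA, List.mem_append] at hx
    rcases hx with hx | hx
    · by_cases hc : suf p.1 == pre p.2
      · rw [if_pos hc, List.mem_singleton] at hx
        subst hx
        exact ⟨hm1, hm2, hne, by simpa using hc⟩
      · simp [hc] at hx
    · by_cases hc : suf p.2 == pre p.1
      · rw [if_pos hc, List.mem_singleton] at hx
        subst hx
        exact ⟨hm2, hm1, Ne.symm hne, by simpa using hc⟩
      · simp [hc] at hx
  · rintro ⟨h1, h2, hne, hov⟩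
    have hne' : keys.idxOf x.1 ≠ keys.idxOf x.2 := by
      intro he
      exact hne ((List.idxOf_inj h1).mp he)
    have gd1 : keys.getD (keys.idxOf x.1) "" = x.1 := by
      rw [List.getD_eq_getElem _ _ (List.idxOf_lt_length_of_mem h1)]
      exact List.getElem_idxOf _
    have gd2 : keys.getD (keys.idxOf x.2) "" = x.2 := by
      rw [List.getD_eq_getElem _ _ (List.idxOf_lt_length_of_mem h2)]
      exact List.getElem_idxOf _
    rcases Nat.lt_or_ge (keys.idxOf x.1) (keys.idxOf x.2) with hlt | hge
    · refine List.mem_flatMap.mpr ⟨(x.1, x.2), ?_, ?_⟩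
      · have := mem_comb2_getD keys "" hlt (List.idxOf_lt_length_of_mem h2)
        rwa [gd1, gd2] at this
      · simp [pvChunkA, hov]
    · have hlt : keys.idxOf x.2 < keys.idxOf x.1 := by omega
      refine List.mem_flatMap.mpr ⟨(x.2, x.1), ?_, ?_⟩
      · have := mem_comb2_getD keys "" hlt (List.idxOf_lt_length_of_mem h1)
        rwa [gd1, gd2] at this
      · simp [pvChunkA, hov]
  
-- membership characterisation of B's unsorted edge list
lemma memB {keys : List String} {suf pre : String → List Char} {x : String × String} :
    x ∈ pvEdgesB keys suf pre ↔
      x.1 ∈ keys ∧ x.2 ∈ keys ∧ x.1 ≠ x.2 ∧ suf x.1 = pre x.2 := by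
  simp only [pvEdgesB, List.mem_flatMap, List.mem_map, List.mem_filter, beq_iff_eq,
    decide_eq_true_eq]
  constructor
  · rintro ⟨u, hu, v, ⟨⟨hv, hov⟩, hvu⟩, rfl⟩
    exact ⟨hu, hv, Ne.symm hvu, hov.symm⟩
  · rintro ⟨h1, h2, hne, hov⟩
    exact ⟨x.1, h1, x.2, ⟨⟨h2, hov.symm⟩, Ne.symm hne⟩, rfl⟩

-- A's edge list is strictly increasing under B's sort key
lemma pairwiseA {keys : List String} {suf pre : String → List Char} (hnd : keys.Nodup) :
    ((comb2 keys).flatMap (pvChunkA suf pre)).Pairwise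
      (fun a b => bKey (pvIdxD keys) (keys.length : Int) a
                < bKey (pvIdxD keys) (keys.length : Int) b) := by
  rw [List.pairwise_flatMap]
  constructor
  · intro p hp
    obtain ⟨i, j, hij, hj, h1, h2⟩ := comb2_elim "" hp
    have hi : i < keys.length := lt_trans hij hj
    have hm1 : p.1 ∈ keys := (comb2_mem_parts hp).1
    have hm2 : p.2 ∈ keys := (comb2_mem_parts hp).2
    have hidx : keys.idxOf p.1 < keys.idxOf p.2 := by
      rw [h1, h2, List.getD_eq_getElem _ _ hi, List.getD_eq_getElem _ _ hj,
        hnd.idxOf_getElem i hi, hnd.idxOf_getElem j hj]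
      exact hij
    obtain ⟨k1, k2⟩ := bKey_eval_lt hnd hm1 hm2 hidx
    unfold pvChunkA
    split_ifs <;> simp_all
  · have base := comb2_pairwise (nodup_pairwise_idxOf hnd)
    rw [List.Pairwise.and_mem] at base
    refine base.imp ?_
    rintro p q ⟨hp, hq, hlex⟩
    obtain ⟨ip, jp, hijp, hjp, hp1, hp2⟩ := comb2_elim "" hp
    obtain ⟨iq, jq, hijq, hjq, hq1, hq2⟩ := comb2_elim "" hq
    have hip : ip < keys.length := lt_trans hijp hjp
    have hiq : iq < keys.length := lt_trans hijq hjq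
    have ep1 : keys.idxOf p.1 = ip := by
      rw [hp1, List.getD_eq_getElem _ _ hip, hnd.idxOf_getElem ip hip]
    have ep2 : keys.idxOf p.2 = jp := by
      rw [hp2, List.getD_eq_getElem _ _ hjp, hnd.idxOf_getElem jp hjp]
    have eq1 : keys.idxOf q.1 = iq := by
      rw [hq1, List.getD_eq_getElem _ _ hiq, hnd.idxOf_getElem iq hiq]
    have eq2 : keys.idxOf q.2 = jq := by
      rw [hq2, List.getD_eq_getElem _ _ hjq, hnd.idxOf_getElem jq hjq]
    have hmp1 : p.1 ∈ keys := (comb2_mem_parts hp).1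
    have hmp2 : p.2 ∈ keys := (comb2_mem_parts hp).2
    have hmq1 : q.1 ∈ keys := (comb2_mem_parts hq).1
    have hmq2 : q.2 ∈ keys := (comb2_mem_parts hq).2
    have hidxp : keys.idxOf p.1 < keys.idxOf p.2 := by rw [ep1, ep2]; exact hijp
    have hidxq : keys.idxOf q.1 < keys.idxOf q.2 := by rw [eq1, eq2]; exact hijq
    obtain ⟨kp1, kp2⟩ := bKey_eval_lt hnd hmp1 hmp2 hidxp
    obtain ⟨kq1, kq2⟩ := bKey_eval_lt hnd hmq1 hmq2 hidxq
    have hlex' : ip < iq ∨ (ip = iq ∧ jp < jq) := by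
      rcases hlex with h | ⟨h, h2⟩
      · left; rwa [ep1, eq1] at h
      · right
        refine ⟨by rw [← ep1, ← eq1, h], by rwa [ep2, eq2] at h2⟩
    have hbase : (ip * keys.length + jp) * 2 + 1 < (iq * keys.length + jq) * 2 :=
      enc_lt hjp hijq hlex'
    intro a ha b hb
    have hav : a = (p.1, p.2) ∨ a = (p.2, p.1) := by
      simp only [pvChunkA, List.mem_append] at ha
      rcases ha with h | h <;> [left; right] <;>
        (split_ifs at h <;> simp_all)
    have hbv : b = (q.1, q.2) ∨ b = (q.2, q.1) := by
      simp only [pvChunkA, List.mem_append] at hb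
      rcases hb with h | h <;> [left; right] <;>
        (split_ifs at h <;> simp_all)
    rw [ep1, ep2] at kp1 kp2
    rw [eq1, eq2] at kq1 kq2
    rcases hav with rfl | rfl <;> rcases hbv with rfl | rfl <;>
      simp only [kp1, kp2, kq1, kq2] <;> exact Nat.cast_lt.mpr (by omega)
  
-- B's unsorted edge list has no duplicates
lemma nodupB {keys : List String} {suf pre : String → List Char} (hnd : keys.Nodup) :
    (pvEdgesB keys suf pre).Nodup := by
  rw [pvEdgesB, List.Nodup, List.pairwise_flatMap]
  constructor
  · intro u _
    have : (((keys.filter (fun v => pre v == suf u)).filter (fun v => decide (v ≠ u)))).Nodup :=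
      (hnd.filter _).filter _
    rw [List.pairwise_map]
    exact this.imp (fun h he => h (by injection he))
  · refine hnd.imp ?_
    intro u u' huu a ha b hb
    rcases List.mem_map.mp ha with ⟨va, _, rfl⟩
    rcases List.mem_map.mp hb with ⟨vb, _, rfl⟩
    intro he
    exact huu (by injection he)

lemma pv_master (keys : List String) (suf pre : String → List Char) (hnd : keys.Nodup) :
    PySem.List.sorted (pvEdgesB keys suf pre) (bKey (pvIdxD keys) (keys.length : Int)) false
      = (comb2 keys).flatMap (pvChunkA suf pre) := by
  apply PySem.List.sorted_eq_of_perm_of_pairwise_lt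
  · rw [List.perm_ext_iff_of_nodup
      ((pairwiseA hnd (suf := suf) (pre := pre)).imp (fun h he => by subst he; exact lt_irrefl _ h))
      (nodupB hnd)]
    intro a
    rw [memA hnd, memB]
  · exact pairwiseA hnd

-- ===== VERDICT (by name: the statement is the Claim_ definition above) =====
lemma A_eq (data : List (String × String)) (k : Int) :
    k_edges data k = (comb2 (PySem.Dict.ofList data).keys).flatMap
      (pvChunkA
        (fun u => PySem.List.slice ((PySem.Dict.ofList data).getD u "").toList (some (-k)) none)
        (fun u => PySem.List.slice ((PySem.Dict.ofList data).getD u "").toList none (some k))) := by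
  unfold k_edges
  simp only []
  have hb : (fun (edges : List (String × String)) (p : String × String) =>
      if is_k_overlap ((PySem.Dict.ofList data).getD p.2 "") ((PySem.Dict.ofList data).getD p.1 "") k = true then
        (if is_k_overlap ((PySem.Dict.ofList data).getD p.1 "") ((PySem.Dict.ofList data).getD p.2 "") k = true then
            edges ++ [(p.1, p.2)]
          else edges) ++
          [(p.2, p.1)]
      else
        if is_k_overlap ((PySem.Dict.ofList data).getD p.1 "") ((PySem.Dict.ofList data).getD p.2 "") k = true then
          edges ++ [(p.1, p.2)]
        else edges)
      = fun es p => es ++ pvChunkA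
          (fun u => PySem.List.slice ((PySem.Dict.ofList data).getD u "").toList (some (-k)) none)
          (fun u => PySem.List.slice ((PySem.Dict.ofList data).getD u "").toList none (some k)) p := by
    funext es p
    simp only [pvChunkA, is_k_overlap]
    split_ifs <;> simp
  rw [hb, PySem.List.foldl_append_eq_flatMap]
  simp

lemma B_eq (data : List (String × String)) (k : Int) :
    k_edges_alt data k = PySem.List.sorted
      (pvEdgesB (PySem.Dict.ofList data).keys
        (fun u => PySem.List.slice ((PySem.Dict.ofList data).getD u "").toList (some (-k)) none)
        (fun u => PySem.List.slice ((PySem.Dict.ofList data).getD u "").toList none (some k)))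
      (bKey (pvIdxD (PySem.Dict.ofList data).keys) ((PySem.Dict.ofList data).keys.length : Int))
      false := by
  unfold k_edges_alt
  simp only []
  have hpref : ∀ c, ((PySem.Dict.ofList data).keys.foldl
      (fun m u => m.modify (PySem.List.slice ((PySem.Dict.ofList data).getD u "").toList none (some k)) [] (· ++ [u]))
      PySem.Dict.empty).getD c []
      = (PySem.Dict.ofList data).keys.filter
          (fun v => PySem.List.slice ((PySem.Dict.ofList data).getD v "").toList none (some k) == c) := by
    intro c
    rw [show ((PySem.Dict.ofList data).keys.foldl
        (fun m u => m.modify (PySem.List.slice ((PySem.Dict.ofList data).getD u "").toList none (some k)) [] (· ++ [u]))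
        PySem.Dict.empty)
      = (((PySem.Dict.ofList data).keys.map
          (fun u => (PySem.List.slice ((PySem.Dict.ofList data).getD u "").toList none (some k), u))).foldl
          (fun m p => m.modify p.1 [] (· ++ [p.2])) PySem.Dict.empty) from
      (List.foldl_map
        (f := fun u => (PySem.List.slice ((PySem.Dict.ofList data).getD u "").toList none (some k), u))
        (g := fun (m : PySem.Dict (List Char) (List String)) (p : (List Char) × String) => m.modify p.1 [] (· ++ [p.2]))).symm]
    rw [PySem.Dict.getD_foldl_modify_append]
    simp [List.filter_map, Function.comp_def]
  have hb : (fun (es : List (String × String)) (u : String) =>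
      List.foldl (fun es v => if v ≠ u then es ++ [(u, v)] else es) es
        ((List.foldl
              (fun m u =>
                m.modify (PySem.List.slice ((PySem.Dict.ofList data).getD u "").toList none (some k)) [] fun x =>
                  x ++ [u])
              PySem.Dict.empty (PySem.Dict.ofList data).keys).getD
          (PySem.List.slice ((PySem.Dict.ofList data).getD u "").toList (some (-k)) none) []))
      = fun es u => es ++
          (((PySem.Dict.ofList data).keys.filter
              (fun v => PySem.List.slice ((PySem.Dict.ofList data).getD v "").toList none (some k)
                == PySem.List.slice ((PySem.Dict.ofList data).getD u "").toList (some (-k)) none)).filter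
            (fun v => decide (v ≠ u))).map (fun v => (u, v)) := by
    funext es u
    rw [hpref]
    rw [PySem.List.foldl_append_ite (p := fun v => v ≠ u) (f := fun v => (u, v))]
  rw [hb, PySem.List.foldl_append_eq_flatMap]
  simp [pvEdgesB, pvIdxD]

theorem k_edges_spec : Claim_equal_k_edges := by
  intro data k _
  unfold Spec_k_edges
  rw [A_eq, B_eq]
  exact (pv_master _ _ _ (PySem.Dict.nodup_keys_ofList data)).symm
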